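-- pv_equiv track=rewrite | github.com/faiq420/NETWORK_SECURITY_ALGOS | RailFence/Decryption.py | createTemplateMatrix
-- ===== SOURCE A (Python) =====
-- def createTemplateMatrix(encrptedTxt, key):
--     rail = [['-' for i in range(len(encrptedTxt))]
--                 for j in range(key)]
--     move_to_next_row = None
--     row, col = 0, 0
--     for i in range(len(encrptedTxt)):
--         if row == 0:
--             move_to_next_row = True
--         if row == key - 1:
--             move_to_next_row = False
--         rail[row][col] = '*'
--         col += 1
--         if move_to_next_row:
--             row += 1
--         else:
--             row -= 1
--     return rail
-- ===== SOURCE B (Python) =====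
-- def createTemplateMatrix(encrptedTxt, key):
--     n = len(encrptedTxt)
--     rail = [['-'] * n for _ in range(key)]
--     cycle = 2 * (key - 1)
--     for i in range(n):
--         r = i % cycle if cycle > 0 else 0
--         row = r if r < key else cycle - r
--         rail[row][i] = '*'
--     return rail
-- ===== Notes on version B (the rewrite author's own statement) =====
-- stated objective: idiomatic
-- what changed: Replaced the stateful zigzag simulation (direction flag, row counter mutated each step) with a direct per-column closed-form row index r = i % (2*(key-1)) folded into the triangular wave, so the loop carries no state besides the matrix.
-- crash fix: For key == 1 and len(encrptedTxt) >= 3 A raises IndexError (its row counter walks off the single rail via negative indexing) while B returns the single all-'*' rail. — e.g. on createTemplateMatrix("abc", 1): A raises IndexError, B returns [["*", "*", "*"]]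
import Mathlib
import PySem

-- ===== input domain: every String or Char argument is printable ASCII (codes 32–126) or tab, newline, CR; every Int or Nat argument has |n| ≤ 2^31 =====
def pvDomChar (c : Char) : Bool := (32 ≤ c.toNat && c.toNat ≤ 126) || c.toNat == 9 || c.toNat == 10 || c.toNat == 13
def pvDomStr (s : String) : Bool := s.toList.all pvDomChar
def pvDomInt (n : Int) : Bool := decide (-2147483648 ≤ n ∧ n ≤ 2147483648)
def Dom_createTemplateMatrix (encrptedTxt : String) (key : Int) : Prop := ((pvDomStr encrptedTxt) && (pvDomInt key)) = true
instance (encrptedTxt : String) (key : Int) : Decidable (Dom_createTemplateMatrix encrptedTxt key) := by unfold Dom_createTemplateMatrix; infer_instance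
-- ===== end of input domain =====

-- B replaces A's stateful zigzag simulation (direction flag + mutated row counter) by a
-- closed-form per-column row index (triangular wave of i % (2*(key-1))); same cost, no loop state.

-- ===== PORT A =====
-- one loop iteration of A: state is (rail, move_to_next_row, row, col); the body ignores i.
-- rail[row][col] = '*' is ported with pySetD/pyGetD (Python negative-index semantics; the
-- out-of-range case, where Python raises IndexError, is excluded by Pre_).
def pvStepA (key : Int) (st : List (List String) × Option Bool × Int × Int) (_i : Int) :
    List (List String) × Option Bool × Int × Int :=
  let rail := st.1
  let move := st.2.1
  let row := st.2.2.1
  let col := st.2.2.2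
  let move := if row = 0 then some true else move
  let move := if row = key - 1 then some false else move
  let rail := PySem.List.pySetD rail row (PySem.List.pySetD (PySem.List.pyGetD rail row []) col "*")
  let col := col + 1
  -- 'if move_to_next_row:' — None and False are falsy
  let row := match move with | some true => row + 1 | _ => row - 1
  (rail, move, row, col)

def createTemplateMatrix (encrptedTxt : String) (key : Int) : List (List String) :=
  let n := PySem.Str.len encrptedTxt
  let rail := (PySem.List.pyRange 0 key 1).map (fun _j => (PySem.List.pyRange 0 n 1).map (fun _i => ("-" : String)))
  ((PySem.List.pyRange 0 n 1).foldl (pvStepA key) (rail, none, 0, 0)).1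

-- ===== PORT B =====
-- one loop iteration of B: the row is computed from the column index i in closed form.
def pvStepB (key : Int) (rail : List (List String)) (i : Int) : List (List String) :=
  let cycle := 2 * (key - 1)
  let r := if 0 < cycle then PySem.Int.mod i cycle else 0
  let row := if r < key then r else cycle - r
  PySem.List.pySetD rail row (PySem.List.pySetD (PySem.List.pyGetD rail row []) i "*")

def createTemplateMatrix_alt (encrptedTxt : String) (key : Int) : List (List String) :=
  let n := PySem.Str.len encrptedTxt
  let rail := (PySem.List.pyRange 0 key 1).map (fun _j => PySem.List.pyRepeat ["-"] n)
  (PySem.List.pyRange 0 n 1).foldl (pvStepB key) rail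

-- ===== PRECONDITION & SPEC =====
-- Pre_ excludes exactly the inputs where A raises IndexError: key ≤ 0 with a nonempty text,
-- and key = 1 with a text of length ≥ 3 (A's row counter walks off the single rail).
def Pre_createTemplateMatrix (encrptedTxt : String) (key : Int) : Prop :=
  2 ≤ key ∨ (key = 1 ∧ PySem.Str.len encrptedTxt ≤ 2) ∨ PySem.Str.len encrptedTxt = 0
instance (encrptedTxt : String) (key : Int) : Decidable (Pre_createTemplateMatrix encrptedTxt key) := by
  unfold Pre_createTemplateMatrix; infer_instance

def pvWitness_createTemplateMatrix : String × Int := ("HELLO", 3)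

-- For key == 1 and len(encrptedTxt) >= 3 A raises IndexError while B returns the single all-'*' rail.
def Raises_createTemplateMatrix (encrptedTxt : String) (key : Int) : Prop :=
  key = 1 ∧ 3 ≤ PySem.Str.len encrptedTxt
instance (encrptedTxt : String) (key : Int) : Decidable (Raises_createTemplateMatrix encrptedTxt key) := by
  unfold Raises_createTemplateMatrix; infer_instance
def pvRaiseWitness_createTemplateMatrix : String × Int := ("abc", 1)
def pvRaiseWitnessOut_createTemplateMatrix : List (List String) := [["*", "*", "*"]]

def Spec_createTemplateMatrix (encrptedTxt : String) (key : Int) (out : List (List String)) : Prop := out = createTemplateMatrix_alt encrptedTxt key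
instance (encrptedTxt : String) (key : Int) (out : List (List String)) : Decidable (Spec_createTemplateMatrix encrptedTxt key out) := by unfold Spec_createTemplateMatrix; infer_instance

-- ===== CLAIM (what is proved, stated in full; the proofs are below) =====
def Claim_equal_createTemplateMatrix : Prop := ∀ (encrptedTxt : String) (key : Int), Dom_createTemplateMatrix encrptedTxt key → Pre_createTemplateMatrix encrptedTxt key → Spec_createTemplateMatrix encrptedTxt key (createTemplateMatrix encrptedTxt key)

def Claim_raises_createTemplateMatrix : Prop := (∀ (encrptedTxt : String) (key : Int), Dom_createTemplateMatrix encrptedTxt key → Raises_createTemplateMatrix encrptedTxt key → ¬ Pre_createTemplateMatrix encrptedTxt key) ∧ (Dom_createTemplateMatrix (pvRaiseWitness_createTemplateMatrix.1) (pvRaiseWitness_createTemplateMatrix.2) ∧ Raises_createTemplateMatrix (pvRaiseWitness_createTemplateMatrix.1) (pvRaiseWitness_createTemplateMatrix.2) ∧ createTemplateMatrix_alt (pvRaiseWitness_createTemplateMatrix.1) (pvRaiseWitness_createTemplateMatrix.2) = pvRaiseWitnessOut_createTemplateMatrix)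

-- ===== LEMMAS AND PROOFS =====

-- closed-form row index for column t (the value B computes)
def pvPos (key : Int) (t : Nat) : Int :=
  let r := PySem.Int.mod (t : Int) (2 * (key - 1))
  if r < key then r else 2 * (key - 1) - r

-- A's direction flag after t iterations
def pvFlag (key : Int) (t : Nat) : Option Bool :=
  if t = 0 then none
  else some (decide (PySem.Int.mod ((t : Int) - 1) (2 * (key - 1)) < key - 1))

theorem pvMod_succ (c : Int) (hc : 2 ≤ c) (t : Nat) :
    ((t : Int) + 1) % c = if (t : Int) % c + 1 < c then (t : Int) % c + 1 else 0 := by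
  have h1 : (1 : Int) % c = 1 := Int.emod_eq_of_lt (by omega) (by omega)
  have hr0 : 0 ≤ (t : Int) % c := Int.emod_nonneg _ (by omega)
  have hrc : (t : Int) % c < c := Int.emod_lt_of_pos _ (by omega)
  rw [Int.add_emod, h1]
  split_ifs with h
  · exact Int.emod_eq_of_lt (by omega) h
  · have he : (t : Int) % c + 1 = c := by omega
    rw [he, Int.emod_self]

theorem pvPosStep (key : Int) (hk : 2 ≤ key) (t : Nat) :
    (if PySem.Int.mod (t : Int) (2 * (key - 1)) < key - 1 then pvPos key t + 1 else pvPos key t - 1)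
      = pvPos key (t + 1) := by
  have hc : (0 : Int) < 2 * (key - 1) := by omega
  unfold pvPos
  simp only [PySem.Int.mod_eq_emod_of_pos hc]
  have hr0 : 0 ≤ (t : Int) % (2 * (key - 1)) := Int.emod_nonneg _ (by omega)
  have hrc : (t : Int) % (2 * (key - 1)) < 2 * (key - 1) := Int.emod_lt_of_pos _ (by omega)
  push_cast
  rw [pvMod_succ (2 * (key - 1)) (by omega) t]
  split_ifs <;> omega

theorem pvFlag_succ (key : Int) (u : Nat) :
    pvFlag key (u + 1) = some (decide (PySem.Int.mod (u : Int) (2 * (key - 1)) < key - 1)) := by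
  have h1 : ((u + 1 : Nat) : Int) - 1 = (u : Int) := by push_cast; ring
  simp [pvFlag]

theorem pvFlagStep (key : Int) (hk : 2 ≤ key) (u : Nat) :
    (if pvPos key u = key - 1 then some false
     else if pvPos key u = 0 then some true else pvFlag key u)
      = some (decide (PySem.Int.mod (u : Int) (2 * (key - 1)) < key - 1)) := by
  have hc : (0 : Int) < 2 * (key - 1) := by omega
  unfold pvPos pvFlag
  simp only [PySem.Int.mod_eq_emod_of_pos hc]
  cases u with
  | zero =>
    have h00 : ((0 : Nat) : Int) % (2 * (key - 1)) = 0 := by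
      push_cast
      exact Int.zero_emod _
    rw [h00]
    have h0 : ¬ ((0 : Int) = key - 1) := by omega
    have h0' : ((0 : Int) < key) := by omega
    rw [if_pos h0', if_neg h0, if_pos rfl]
    simp
    omega
  | succ v =>
    have hr0 : 0 ≤ (v : Int) % (2 * (key - 1)) := Int.emod_nonneg _ (by omega)
    have hrc : (v : Int) % (2 * (key - 1)) < 2 * (key - 1) := Int.emod_lt_of_pos _ (by omega)
    have hnz : ¬ (v + 1 = 0) := by omega
    rw [show ((v + 1 : Nat) : Int) = (v : Int) + 1 from by push_cast; ring]
    rw [show ((v : Int) + 1 - 1) = (v : Int) from by ring]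
    rw [pvMod_succ (2 * (key - 1)) (by omega) v]
    simp only [hnz, if_false]
    split_ifs <;> simp_all <;> omega

-- one iteration of A, started from the invariant state, performs one iteration of B
theorem pvStepEq (key : Int) (hk : 2 ≤ key) (rail : List (List String)) (u : Nat) :
    pvStepA key (rail, pvFlag key u, pvPos key u, (u : Int)) (u : Int)
      = (pvStepB key rail (u : Int), pvFlag key (u + 1), pvPos key (u + 1), (u : Int) + 1) := by
  have hc : (0 : Int) < 2 * (key - 1) := by omega
  have hflag := pvFlagStep key hk u
  unfold pvStepA pvStepB
  simp only [Prod.mk.injEq]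
  refine ⟨?_, ?_, ?_, trivial⟩
  · unfold pvPos
    simp only [if_pos hc]
  · rw [pvFlag_succ]
    exact hflag
  · rw [hflag]
    by_cases hP : PySem.Int.mod (u : Int) (2 * (key - 1)) < key - 1
    · simp only [decide_eq_true hP]
      rw [← pvPosStep key hk u, if_pos hP]
    · simp only [decide_eq_false hP]
      rw [← pvPosStep key hk u, if_neg hP]

-- the loop invariant: A's fold carries (B's fold, pvFlag, pvPos, column counter)
theorem pvInv (key : Int) (hk : 2 ≤ key) (init : List (List String)) (t : Nat) :
    (PySem.List.pyRange 0 (t : Int) 1).foldl (pvStepA key) (init, none, 0, 0)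
      = ((PySem.List.pyRange 0 (t : Int) 1).foldl (pvStepB key) init, pvFlag key t, pvPos key t, (t : Int)) := by
  induction t with
  | zero =>
    have hpos0 : pvPos key 0 = 0 := by
      unfold pvPos
      simp only [PySem.Int.mod_eq_emod_of_pos (show (0:Int) < 2*(key-1) by omega)]
      norm_num
      omega
    simp [PySem.List.pyRange_one_eq_nil (by omega : (0:Int) ≤ 0), pvFlag, hpos0]
  | succ u ih =>
    have hcast : ((u + 1 : Nat) : Int) = (u : Int) + 1 := by push_cast; ring
    have hsplit : PySem.List.pyRange 0 ((u + 1 : Nat) : Int) 1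
        = PySem.List.pyRange 0 (u : Int) 1 ++ [(u : Int)] := by
      rw [hcast, PySem.List.pyRange_one_succ_right (by positivity)]
    rw [hsplit, List.foldl_append, List.foldl_append, ih]
    simp only [List.foldl_cons, List.foldl_nil]
    rw [pvStepEq key hk _ u, hcast]

-- the two initial matrices are the same
theorem pvInitEq (n key : Int) :
    (PySem.List.pyRange 0 key 1).map (fun _j => (PySem.List.pyRange 0 n 1).map (fun _i => ("-" : String)))
      = (PySem.List.pyRange 0 key 1).map (fun _j => PySem.List.pyRepeat ["-"] n) := by
  apply List.map_congr_left
  intro _ _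
  rw [PySem.List.pyRepeat_singleton, List.map_const', PySem.List.length_pyRange_one]
  norm_num

-- both ports only use the text through its length
theorem pvA_len (s : String) (key : Int) :
    createTemplateMatrix s key
      = ((PySem.List.pyRange 0 (s.toList.length : Int) 1).foldl (pvStepA key)
          ((PySem.List.pyRange 0 key 1).map (fun _j => (PySem.List.pyRange 0 (s.toList.length : Int) 1).map (fun _i => ("-" : String))), none, 0, 0)).1 := by
  simp [createTemplateMatrix, PySem.Str.len_eq]

theorem pvB_len (s : String) (key : Int) :
    createTemplateMatrix_alt s key
      = (PySem.List.pyRange 0 (s.toList.length : Int) 1).foldl (pvStepB key)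
          ((PySem.List.pyRange 0 key 1).map (fun _j => PySem.List.pyRepeat ["-"] (s.toList.length : Int))) := by
  simp [createTemplateMatrix_alt, PySem.Str.len_eq]

-- ===== VERDICT (by name: the statement is the Claim_ definition above) =====
theorem createTemplateMatrix_spec : Claim_equal_createTemplateMatrix := by
  intro s key _hdom hpre
  unfold Spec_createTemplateMatrix
  rcases hpre with hk2 | ⟨hk1, hlen⟩ | hlen0
  · -- key ≥ 2 : the loop invariant
    rw [pvA_len, pvB_len, pvInitEq, pvInv key hk2]
  · -- key = 1 and length ≤ 2 : three closed cases
    subst hk1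
    rw [PySem.Str.len_eq] at hlen
    rw [pvA_len, pvB_len]
    set m := s.toList.length with hm
    have hm2 : m ≤ 2 := by exact_mod_cast hlen
    interval_cases m <;> decide
  · -- empty text : the loops do not run
    rw [PySem.Str.len_eq] at hlen0
    rw [pvA_len, pvB_len]
    simp only [hlen0]
    rw [pvInitEq]
    simp [PySem.List.pyRange_one_eq_nil]

@[simp] theorem createTemplateMatrix_raises : Claim_raises_createTemplateMatrix := by
  unfold Claim_raises_createTemplateMatrix
  constructor
  · intro s key _hdom hr
    unfold Raises_createTemplateMatrix at hr
    unfold Pre_createTemplateMatrix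
    omega
  · exact ⟨by decide, by decide, by decide⟩
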